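-- pv_equiv track=rewrite | github.com/harshnative/Python-Practive-Question-With-Solutions | practice question set 3/answers.py | grabDomain
-- ===== SOURCE A (Python) =====
-- def grabDomain(string):
--     myString = ""
--     found = False
--     for i in string:
--         if(found):
--             myString = myString + i
--
--         if(i == "@"):
--
--             found = True
--
--     return myString
-- ===== SOURCE B (Python) =====
-- def grabDomain(string):
--     return string.partition("@")[2]
-- ===== Notes on version B (the rewrite author's own statement) =====
-- stated objective: idiomatic
-- what changed: Replaced the manual character loop with a found-flag and repeated string concatenation by a single str.partition call, returning the part after the first separator (empty when the separator is absent).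
import Mathlib
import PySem

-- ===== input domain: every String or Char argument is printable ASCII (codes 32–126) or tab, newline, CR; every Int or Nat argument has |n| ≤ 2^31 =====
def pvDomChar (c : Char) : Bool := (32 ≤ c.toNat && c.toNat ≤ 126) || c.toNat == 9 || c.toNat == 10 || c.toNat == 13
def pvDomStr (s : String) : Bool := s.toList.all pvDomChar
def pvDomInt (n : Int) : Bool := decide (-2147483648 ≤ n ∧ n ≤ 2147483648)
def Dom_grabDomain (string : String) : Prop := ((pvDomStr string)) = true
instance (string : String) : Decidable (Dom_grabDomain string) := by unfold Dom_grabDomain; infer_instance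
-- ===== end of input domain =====

-- B replaces A's char loop with a found flag by str.partition("@")[2]; objective: idiomatic.

-- ===== PORT A =====
-- the loop: myString accumulates chars seen while found is true; '@' flips found after the append check
def grabDomainLoop : List Char → Bool → List Char
  | [], _ => []
  | i :: t, found =>
      (if found then [i] else []) ++ grabDomainLoop t (found || (i == '@'))

def grabDomain (string : String) : String :=
  String.ofList (grabDomainLoop string.toList false)

-- ===== PORT B =====
-- partition("@")[2]: drop everything up to and including the first '@' ('' when absent)
def grabDomain_alt (string : String) : String :=
  String.ofList ((string.toList.dropWhile (· != '@')).drop 1)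

-- ===== PRECONDITION & SPEC =====
def Spec_grabDomain (string : String) (out : String) : Prop := out = grabDomain_alt string
instance (string : String) (out : String) : Decidable (Spec_grabDomain string out) := by unfold Spec_grabDomain; infer_instance

-- ===== CLAIM (what is proved, stated in full; the proofs are below) =====
def Claim_equal_grabDomain : Prop := ∀ (string : String), Dom_grabDomain string → Spec_grabDomain string (grabDomain string)

-- ===== LEMMAS AND PROOFS =====
theorem grabDomainLoop_true (l : List Char) : grabDomainLoop l true = l := by
  induction l with
  | nil => rfl
  | cons i t ih => simp [grabDomainLoop, ih]

theorem grabDomainLoop_false (l : List Char) :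
    grabDomainLoop l false = (l.dropWhile (· != '@')).drop 1 := by
  induction l with
  | nil => rfl
  | cons i t ih =>
      by_cases h : i = '@'
      · subst h; simp [grabDomainLoop, grabDomainLoop_true, List.dropWhile]
      · have hb : (i == '@') = false := by simp [h]
        have hb2 : (i != '@') = true := by simp [h]
        simp [grabDomainLoop, List.dropWhile, hb, hb2, ih]

-- ===== VERDICT (by name: the statement is the Claim_ definition above) =====
theorem grabDomain_spec : Claim_equal_grabDomain := by
  intro s _
  unfold Spec_grabDomain grabDomain grabDomain_alt
  rw [grabDomainLoop_false]
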